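-- pv_equiv track=rewrite | github.com/Mark-Percy/adventOfCode | 2023/Day3/task.py | makeLineDic
-- ===== SOURCE A (Python) =====
-- def makeLineDic(line):
--     lineDic = {}
--     digitarr = []
--     numString = ''
--
--     for key, char in enumerate(line):
--         if char.isdigit():
--             numString += char
--             digitarr.append(key)
--         elif digitarr != []:
--             digitarr.insert(0, digitarr[0] - 1)
--             digitarr.append(digitarr[len(digitarr) - 1] + 1)
--             if lineDic.get(numString): lineDic[numString].append(digitarr)
--             else: lineDic[numString] = [digitarr]
--
--             digitarr = []
--             numString = ''
--     if(numString != '' and digitarr != []):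
--         digitarr.insert(0, digitarr[0] - 1)
--         digitarr.append(digitarr[len(digitarr) - 1] + 1)
--         if lineDic.get(numString): lineDic[numString].append(digitarr)
--         else: lineDic[numString] = [digitarr]
--     return lineDic
-- ===== SOURCE B (Python) =====
-- def makeLineDic(line):
--     lineDic = {}
--     i, n = 0, len(line)
--     while i < n:
--         if line[i].isdigit():
--             j = i
--             while j < n and line[j].isdigit():
--                 j += 1
--             lineDic.setdefault(line[i:j], []).append(list(range(i - 1, j + 1)))
--             i = j
--         else:
--             i += 1
--     return lineDic
-- ===== Notes on version B (the rewrite author's own statement) =====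
-- stated objective: simpler
-- what changed: Replaces A's char-by-char accumulator loop with its duplicated end-of-run/end-of-line flush blocks by a single two-pointer scan that finds each maximal digit run, slices it as the key and stores list(range(i-1, j+1)) via dict.setdefault.
import Mathlib
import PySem

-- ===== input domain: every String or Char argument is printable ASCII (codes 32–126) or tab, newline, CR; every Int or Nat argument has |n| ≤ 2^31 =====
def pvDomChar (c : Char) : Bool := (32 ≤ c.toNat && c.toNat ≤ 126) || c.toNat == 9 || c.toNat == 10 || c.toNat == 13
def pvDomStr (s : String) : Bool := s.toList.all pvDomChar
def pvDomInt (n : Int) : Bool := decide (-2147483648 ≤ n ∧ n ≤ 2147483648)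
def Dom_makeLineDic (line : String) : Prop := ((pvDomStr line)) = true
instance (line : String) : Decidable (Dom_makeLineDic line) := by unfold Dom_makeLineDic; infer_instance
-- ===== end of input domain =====

-- B is a simpler two-pointer scan over maximal digit runs (no char-by-char accumulator or
-- end-of-line flush); equal return value, same cost.

-- ===== PORT A =====
-- the duplicated flush block of A (insert neighbours, then store under numString)
def pvAdd (dic : PySem.Dict String (List (List Int))) (arr : List Int) (num : List Char) :
    PySem.Dict String (List (List Int)) :=
  -- digitarr.insert(0, digitarr[0] - 1): arr is nonempty at both call sites, so arr[0] = arr.headI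
  let a1 : List Int := (arr.headI - 1) :: arr
  -- digitarr.append(digitarr[len(digitarr) - 1] + 1)
  let a2 : List Int := a1 ++ [a1.getLastD 0 + 1]
  -- 'if lineDic.get(numString):' — truthy iff present with a nonempty list
  if ((dic.get? (String.ofList num)).getD []) ≠ [] then
    dic.modify (String.ofList num) [] (· ++ [a2])
  else
    dic.insert (String.ofList num) [a2]

def pvStep (st : PySem.Dict String (List (List Int)) × List Int × List Char) (kc : Int × Char) :
    PySem.Dict String (List (List Int)) × List Int × List Char :=
  if kc.2.isDigit then (st.1, st.2.1 ++ [kc.1], st.2.2 ++ [kc.2])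
  else if st.2.1 ≠ [] then (pvAdd st.1 st.2.1 st.2.2, [], [])
  else st

-- the trailing 'if(numString != '' and digitarr != [])' flush
def pvFinish (st : PySem.Dict String (List (List Int)) × List Int × List Char) :
    PySem.Dict String (List (List Int)) :=
  if st.2.2 ≠ [] ∧ st.2.1 ≠ [] then pvAdd st.1 st.2.1 st.2.2 else st.1

def makeLineDic (line : String) : List (String × List (List Int)) :=
  (pvFinish ((PySem.List.enumerate line.toList 0).foldl pvStep (PySem.Dict.empty, [], []))).items

-- ===== PORT B =====
-- lineDic.setdefault(line[i:j], []).append(list(range(i - 1, j + 1)))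
def pvAppendAt (d : PySem.Dict String (List (List Int))) (key : String) (entry : List Int) :
    PySem.Dict String (List (List Int)) :=
  match d.get? key with
  | some v => d.insert key (v ++ [entry])
  | none => d.insert key [entry]

-- the outer while loop; the inner 'while j < n and line[j].isdigit()' is the takeWhile/dropWhile split
def pvScan (cs : List Char) (i : Int) (d : PySem.Dict String (List (List Int))) :
    PySem.Dict String (List (List Int)) :=
  match cs with
  | [] => d
  | c :: rest =>
    if c.isDigit then
      let t := rest.takeWhile Char.isDigit
      let j := i + 1 + (t.length : Int)
      pvScan (rest.dropWhile Char.isDigit) j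
        (pvAppendAt d (String.ofList (c :: t)) (PySem.List.pyRange (i - 1) (j + 1) 1))
    else pvScan rest (i + 1) d
termination_by cs.length
decreasing_by
  · exact Nat.lt_succ_of_le (List.length_dropWhile_le ..)
  · simp

def makeLineDic_alt (line : String) : List (String × List (List Int)) :=
  (pvScan line.toList 0 PySem.Dict.empty).items

-- ===== PRECONDITION & SPEC =====
def Spec_makeLineDic (line : String) (out : List (String × List (List Int))) : Prop := out = makeLineDic_alt line
instance (line : String) (out : List (String × List (List Int))) : Decidable (Spec_makeLineDic line out) := by unfold Spec_makeLineDic; infer_instance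

-- ===== CLAIM (what is proved, stated in full; the proofs are below) =====
def Claim_equal_makeLineDic : Prop := ∀ (line : String), Dom_makeLineDic line → Spec_makeLineDic line (makeLineDic line)

-- ===== LEMMAS AND PROOFS =====

-- every value stored in the dict is a nonempty list (so A's truthiness test = presence test)
def pvInv (d : PySem.Dict String (List (List Int))) : Prop := ∀ v ∈ d.values, v ≠ []

lemma pvInv_empty : pvInv (PySem.Dict.empty : PySem.Dict String (List (List Int))) := by
  intro v hv; simp [PySem.Dict.values, PySem.Dict.empty] at hv

lemma pvInv_appendAt (d : PySem.Dict String (List (List Int))) (key : String) (entry : List Int)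
    (h : pvInv d) : pvInv (pvAppendAt d key entry) := by
  unfold pvAppendAt
  intro w hw
  revert hw
  cases hg : d.get? key with
  | some v =>
    intro hw
    rcases PySem.Dict.mem_values_insert d key (v ++ [entry]) w hw with rfl | hw'
    · simp
    · exact h w hw'
  | none =>
    intro hw
    rcases PySem.Dict.mem_values_insert d key [entry] w hw with rfl | hw'
    · simp
    · exact h w hw'

lemma pvAdd_eq_appendAt (d : PySem.Dict String (List (List Int))) (arr : List Int) (num : List Char)
    (h : pvInv d) :
    pvAdd d arr num
      = pvAppendAt d (String.ofList num) ((arr.headI - 1) :: arr ++ [((arr.headI - 1) :: arr).getLastD 0 + 1]) := by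
  unfold pvAdd pvAppendAt
  cases hg : d.get? (String.ofList num) with
  | some v =>
    have hv : v ≠ [] := by
      apply h
      have hm := PySem.Dict.mem_items_of_get?_eq_some d hg
      simp only [PySem.Dict.values]
      exact List.mem_map.mpr ⟨_, hm, rfl⟩
    simp only [Option.getD_some, ne_eq, hv, not_false_iff, if_pos]
    have hmod : d.modify (String.ofList num) []
        (· ++ [(arr.headI - 1) :: arr ++ [((arr.headI - 1) :: arr).getLastD 0 + 1]])
        = d.insert (String.ofList num)
            (d.getD (String.ofList num) [] ++ [(arr.headI - 1) :: arr ++ [((arr.headI - 1) :: arr).getLastD 0 + 1]]) := rfl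
    rw [hmod, PySem.Dict.getD_of_get?_eq_some d [] hg]
  | none =>
    simp

lemma pv_dropWhile_head_false (p : Char → Bool) (l : List Char) (c : Char) (r : List Char)
    (h : l.dropWhile p = c :: r) : p c = false := by
  induction l with
  | nil => simp at h
  | cons a l ih =>
    by_cases ha : p a
    · rw [List.dropWhile_cons_of_pos ha] at h; exact ih h
    · rw [List.dropWhile_cons_of_neg ha] at h
      cases h; simpa using ha

-- unfolding equations for B's well-founded scan
lemma pvScan_nil (i : Int) (d : PySem.Dict String (List (List Int))) : pvScan [] i d = d := by
  rw [pvScan]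

lemma pvScan_cons_digit (c : Char) (rest : List Char) (i : Int)
    (d : PySem.Dict String (List (List Int))) (hc : c.isDigit = true) :
    pvScan (c :: rest) i d
      = pvScan (rest.dropWhile Char.isDigit) (i + 1 + ((rest.takeWhile Char.isDigit).length : Int))
          (pvAppendAt d (String.ofList (c :: rest.takeWhile Char.isDigit))
            (PySem.List.pyRange (i - 1) (i + 1 + ((rest.takeWhile Char.isDigit).length : Int) + 1) 1)) := by
  rw [pvScan]; simp [hc]

lemma pvScan_cons_nondigit (c : Char) (rest : List Char) (i : Int)
    (d : PySem.Dict String (List (List Int))) (hc : c.isDigit = false) :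
    pvScan (c :: rest) i d = pvScan rest (i + 1) d := by
  rw [pvScan]; simp [hc]

-- running A's loop through a block of digits just extends the accumulators
lemma pv_foldl_digits (ds : List Char) (hds : ∀ c ∈ ds, c.isDigit = true) :
    ∀ (rest : List Char) (k : Int) (d0 : PySem.Dict String (List (List Int)))
      (arr0 : List Int) (num0 : List Char),
    (PySem.List.enumerate (ds ++ rest) k).foldl pvStep (d0, arr0, num0)
      = (PySem.List.enumerate rest (k + ds.length)).foldl pvStep
          (d0, arr0 ++ PySem.List.pyRange k (k + ds.length) 1, num0 ++ ds) := by
  induction ds with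
  | nil =>
    intro rest k d0 arr0 num0
    simp [PySem.List.pyRange_one_eq_nil (le_refl k)]
  | cons c ds ih =>
    intro rest k d0 arr0 num0
    have hc : c.isDigit = true := hds c (by simp)
    rw [List.cons_append, PySem.List.enumerate_cons, List.foldl_cons]
    have hstep : pvStep (d0, arr0, num0) (k, c) = (d0, arr0 ++ [k], num0 ++ [c]) := by
      simp [pvStep, hc]
    rw [hstep, ih (fun x hx => hds x (by simp [hx])) rest (k + 1) d0 (arr0 ++ [k]) (num0 ++ [c])]
    have h1 : (k + 1) + (ds.length : Int) = k + ((c :: ds).length : Int) := by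
      push_cast [List.length_cons]; ring
    rw [h1]
    have h2 : arr0 ++ [k] ++ PySem.List.pyRange (k + 1) (k + ((c :: ds).length : Int)) 1
        = arr0 ++ PySem.List.pyRange k (k + ((c :: ds).length : Int)) 1 := by
      rw [List.append_assoc]
      congr 1
      have hlt : k < k + ((c :: ds).length : Int) := by
        have : (0 : Int) < ((c :: ds).length : Int) := by exact_mod_cast Nat.succ_pos ds.length
        omega
      rw [PySem.List.pyRange_one_cons hlt]
      rfl
    have h3 : num0 ++ [c] ++ ds = num0 ++ c :: ds := by simp
    rw [h2, h3]

-- the digit-run neighbourhood list A builds equals B's range(i-1, j+1)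
lemma pv_arr2_eq (k : Int) (m : Nat) (hm : 1 ≤ m) :
    ((PySem.List.pyRange k (k + m) 1).headI - 1) :: PySem.List.pyRange k (k + m) 1
        ++ [(((PySem.List.pyRange k (k + m) 1).headI - 1) :: PySem.List.pyRange k (k + m) 1).getLastD 0 + 1]
      = PySem.List.pyRange (k - 1) (k + m + 1) 1 := by
  have hm' : (1 : Int) ≤ (m : Int) := by exact_mod_cast hm
  have hk : k < k + m := by omega
  have hhead : (PySem.List.pyRange k (k + m) 1).headI = k := by
    rw [PySem.List.pyRange_one_cons hk]; rfl
  have hsplit : PySem.List.pyRange k (k + m) 1 = PySem.List.pyRange k (k + m - 1) 1 ++ [k + m - 1] := by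
    have h := PySem.List.pyRange_one_succ_right (a := k) (b := k + m - 1) (by omega)
    rw [show k + (m : Int) - 1 + 1 = k + m by ring] at h
    exact h
  have hlast : ((k - 1) :: PySem.List.pyRange k (k + m) 1).getLastD 0 = k + m - 1 := by
    rw [List.getLastD_cons, hsplit, List.getLastD_concat]
  rw [hhead, hlast]
  rw [PySem.List.pyRange_one_cons (show k - 1 < k + m + 1 by omega)]
  rw [show k - 1 + 1 = k by ring]
  rw [PySem.List.pyRange_one_succ_right (show k ≤ k + m by omega)]
  simp

lemma pv_main : ∀ (n : Nat) (cs : List Char), cs.length ≤ n → ∀ (k : Int)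
    (d : PySem.Dict String (List (List Int))), pvInv d →
    pvFinish ((PySem.List.enumerate cs k).foldl pvStep (d, [], [])) = pvScan cs k d := by
  intro n
  induction n with
  | zero =>
    intro cs hcs k d _
    rw [List.length_eq_zero_iff.mp (Nat.le_zero.mp hcs)]
    simp [PySem.List.enumerate_nil, pvScan_nil, pvFinish]
  | succ n ih =>
    intro cs hcs k d hinv
    match cs with
    | [] => simp [PySem.List.enumerate_nil, pvScan_nil, pvFinish]
    | c :: rest =>
      by_cases hc : c.isDigit
      · -- digit run: c :: takeWhile, then dropWhile
        set t := rest.takeWhile Char.isDigit with ht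
        set r := rest.dropWhile Char.isDigit with hr
        have hsplit : c :: rest = (c :: t) ++ r := by
          rw [List.cons_append]
          rw [ht, hr, List.takeWhile_append_dropWhile]
        have hds : ∀ x ∈ c :: t, x.isDigit = true := by
          intro x hx
          rcases List.mem_cons.mp hx with rfl | hx'
          · exact hc
          · exact List.mem_takeWhile_imp hx'
        have hmlen : (((c :: t).length : Nat) : Int) = 1 + (t.length : Int) := by
          push_cast [List.length_cons]; ring
        have harr : PySem.List.pyRange k (k + ((c :: t).length : Int)) 1 ≠ [] := by
          rw [PySem.List.pyRange_one_cons (by omega : k < k + ((c :: t).length : Int))]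
          · simp
        have hrange := pv_arr2_eq k (c :: t).length (by simp)
        set d2 := pvAppendAt d (String.ofList (c :: t))
            (PySem.List.pyRange (k - 1) (k + ((c :: t).length : Int) + 1) 1) with hd2
        have hinv2 : pvInv d2 := pvInv_appendAt _ _ _ hinv
        have hadd : pvAdd d (PySem.List.pyRange k (k + ((c :: t).length : Int)) 1) (c :: t) = d2 := by
          rw [pvAdd_eq_appendAt d _ _ hinv, hrange]
        have hscan : pvScan (c :: rest) k d
            = pvScan r (k + ((c :: t).length : Int)) d2 := by
          rw [pvScan_cons_digit c rest k d hc, ← ht, ← hr, hd2]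
          rw [show k + 1 + (t.length : Int) = k + ((c :: t).length : Int) by omega]
        rw [hscan, hsplit, pv_foldl_digits (c :: t) hds r k d [] []]
        rw [List.nil_append, List.nil_append]
        match hr2 : r with
        | [] =>
          rw [PySem.List.enumerate_nil, List.foldl_nil, pvFinish]
          rw [if_pos ⟨by simp, harr⟩]
          rw [hadd, pvScan_nil]
        | c' :: r' =>
          have hc' : c'.isDigit = false := pv_dropWhile_head_false _ rest c' r' hr.symm
          rw [PySem.List.enumerate_cons, List.foldl_cons]
          have hstep : pvStep (d, PySem.List.pyRange k (k + ((c :: t).length : Int)) 1, c :: t)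
              (k + ((c :: t).length : Int), c') = (d2, [], []) := by
            rw [pvStep]
            simp only [hc', Bool.false_eq_true, if_false, ne_eq, harr, not_false_iff, if_pos]
            rw [hadd]
          rw [hstep]
          have hlen : r'.length ≤ n := by
            have h1 : r.length ≤ rest.length := List.length_dropWhile_le ..
            have h2 := hcs
            simp only [List.length_cons] at h2
            rw [hr2, List.length_cons] at h1
            omega
          rw [ih r' hlen (k + ((c :: t).length : Int) + 1) d2 hinv2]
          rw [pvScan_cons_nondigit c' r' _ d2 hc']
      · -- non-digit first char with empty accumulators: nothing happens
        rw [PySem.List.enumerate_cons, List.foldl_cons]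
        have hstep : pvStep (d, ([] : List Int), ([] : List Char)) (k, c) = (d, [], []) := by
          simp [pvStep, hc]
        have hlen : rest.length ≤ n := by
          simp only [List.length_cons] at hcs; omega
        rw [hstep, ih rest hlen (k + 1) d hinv]
        rw [pvScan_cons_nondigit c rest k d (by simpa using hc)]

-- ===== VERDICT (by name: the statement is the Claim_ definition above) =====
theorem makeLineDic_spec : Claim_equal_makeLineDic := by
  intro line _
  show makeLineDic line = makeLineDic_alt line
  unfold makeLineDic makeLineDic_alt
  rw [pv_main line.toList.length line.toList (le_refl _) 0 PySem.Dict.empty pvInv_empty]
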